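-- pv_equiv track=rewrite | github.com/cyan-wolf/competitive_programming | matcomgrader/icpc_caribbean_qualifiers_2022/warmup_1/j.py | det_cubes_to_remove
-- ===== SOURCE A (Python) =====
-- def det_cubes_to_remove(cubes):
--     matches = 0
--     unpaired_red = 0
--     unpaired_blue = 0
--
--     for c in cubes:
--         if c == '0':
--             if unpaired_blue > 0:
--                 unpaired_blue -= 1
--                 matches += 1
--
--             else:
--                 unpaired_red += 1
--
--         else:
--             if unpaired_red > 0:
--                 unpaired_red -= 1
--                 matches += 1
--
--             else:
--                 unpaired_blue += 1
--
--     return 2 * matches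
-- ===== SOURCE B (Python) =====
-- def det_cubes_to_remove(cubes):
--     zeros = 0
--     total = 0
--     for c in cubes:
--         total += 1
--         if c == '0':
--             zeros += 1
--     return 2 * min(zeros, total - zeros)
-- ===== Notes on version B (the rewrite author's own statement) =====
-- stated objective: simpler
-- what changed: Replaces the three-counter greedy matching state machine with a single count of '0' cubes (everything else is blue) and the closed form 2*min(zeros, total-zeros).
import Mathlib
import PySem

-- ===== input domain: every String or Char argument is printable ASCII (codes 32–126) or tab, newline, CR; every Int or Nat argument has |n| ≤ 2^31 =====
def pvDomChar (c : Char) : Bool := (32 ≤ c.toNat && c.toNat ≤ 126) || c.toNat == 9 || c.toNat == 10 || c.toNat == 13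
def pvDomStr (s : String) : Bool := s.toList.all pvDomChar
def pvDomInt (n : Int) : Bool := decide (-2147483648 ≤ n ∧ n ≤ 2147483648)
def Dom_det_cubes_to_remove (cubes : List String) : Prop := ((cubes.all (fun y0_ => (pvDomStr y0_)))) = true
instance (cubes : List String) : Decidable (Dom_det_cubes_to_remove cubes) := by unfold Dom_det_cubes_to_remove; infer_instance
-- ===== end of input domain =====

-- B replaces A's three-counter greedy state machine by counting '0' cubes and
-- the closed form 2*min(zeros, total-zeros); objective: simpler.

-- ===== PORT A =====
-- one loop step of A: state = (matches, unpaired_red, unpaired_blue)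
def detCubesStepA (s : Int × Int × Int) (c : String) : Int × Int × Int :=
  if c == "0" then
    if s.2.2 > 0 then (s.1 + 1, s.2.1, s.2.2 - 1) else (s.1, s.2.1 + 1, s.2.2)
  else
    if s.2.1 > 0 then (s.1 + 1, s.2.1 - 1, s.2.2) else (s.1, s.2.1, s.2.2 + 1)

def det_cubes_to_remove (cubes : List String) : Int :=
  2 * (cubes.foldl detCubesStepA (0, 0, 0)).1

-- ===== PORT B =====
-- one loop step of B: state = (zeros, total)
def detCubesStepB (p : Int × Int) (c : String) : Int × Int :=
  (if c == "0" then p.1 + 1 else p.1, p.2 + 1)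

def det_cubes_to_remove_alt (cubes : List String) : Int :=
  let zt := cubes.foldl detCubesStepB (0, 0)
  2 * min zt.1 (zt.2 - zt.1)

-- ===== PRECONDITION & SPEC =====
def Spec_det_cubes_to_remove (cubes : List String) (out : Int) : Prop := out = det_cubes_to_remove_alt cubes
instance (cubes : List String) (out : Int) : Decidable (Spec_det_cubes_to_remove cubes out) := by unfold Spec_det_cubes_to_remove; infer_instance

-- ===== CLAIM (what is proved, stated in full; the proofs are below) =====
def Claim_equal_det_cubes_to_remove : Prop := ∀ (cubes : List String), Dom_det_cubes_to_remove cubes → Spec_det_cubes_to_remove cubes (det_cubes_to_remove cubes)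

-- ===== LEMMAS AND PROOFS =====

-- A's state after any prefix with z zeros and t cubes is (min z (t-z), z-min, (t-z)-min).
theorem detCubes_loop_eq (xs : List String) : ∀ (z t : Int), 0 ≤ z → z ≤ t →
    (xs.foldl detCubesStepA (min z (t - z), z - min z (t - z), (t - z) - min z (t - z))).1
      = min (xs.foldl detCubesStepB (z, t)).1
          ((xs.foldl detCubesStepB (z, t)).2 - (xs.foldl detCubesStepB (z, t)).1) := by
  induction xs with
  | nil => intro z t hz hzt; simp
  | cons c xs ih =>
    intro z t hz hzt
    by_cases h : c == "0"
    · have hstep : detCubesStepA (min z (t - z), z - min z (t - z), (t - z) - min z (t - z)) c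
          = (min (z+1) (t+1-(z+1)), (z+1) - min (z+1) (t+1-(z+1)),
             (t+1-(z+1)) - min (z+1) (t+1-(z+1))) := by
        unfold detCubesStepA
        rw [if_pos h]
        dsimp only
        split_ifs with hb <;> simp only [Prod.mk.injEq] <;>
          exact ⟨by omega, by omega, by omega⟩
      have hB : detCubesStepB (z, t) c = (z + 1, t + 1) := by
        simp [detCubesStepB, h]
      simp only [List.foldl_cons, hstep, hB]
      exact ih (z+1) (t+1) (by omega) (by omega)
    · have hstep : detCubesStepA (min z (t - z), z - min z (t - z), (t - z) - min z (t - z)) c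
          = (min z (t+1-z), z - min z (t+1-z), (t+1-z) - min z (t+1-z)) := by
        unfold detCubesStepA
        rw [if_neg h]
        dsimp only
        split_ifs with hr <;> simp only [Prod.mk.injEq] <;>
          exact ⟨by omega, by omega, by omega⟩
      have hB : detCubesStepB (z, t) c = (z, t + 1) := by
        simp [detCubesStepB, h]
      simp only [List.foldl_cons, hstep, hB]
      exact ih z (t+1) hz (by omega)

-- ===== VERDICT (by name: the statement is the Claim_ definition above) =====
theorem det_cubes_to_remove_spec : Claim_equal_det_cubes_to_remove := by
  intro cubes _
  unfold Spec_det_cubes_to_remove det_cubes_to_remove det_cubes_to_remove_alt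
  have h := detCubes_loop_eq cubes 0 0 le_rfl le_rfl
  simp only [show (min (0:Int) (0-0), (0:Int) - min 0 (0-0), ((0:Int)-0) - min 0 (0-0)) = ((0:Int),(0:Int),(0:Int)) by norm_num] at h
  simp [h]
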